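-- pv_equiv track=rewrite | github.com/NYH0227/Coding_Test | 1031_Y_codingtest.py | aka
-- ===== SOURCE A (Python) =====
-- def aka(s):
--     re_s = s[::-1]
--     if len(s) == 1 : return 1
--
--     if re_s == s:
--         if aka(s[:len(s)//2]) == 1:
--             return 1
--     else:
--         return 0
-- ===== SOURCE B (Python) =====
-- def aka(s):
--     lengths = []
--     n = len(s)
--     while n > 1:
--         lengths.append(n)
--         n //= 2
--     return 1 if all(s[:m] == s[:m][::-1] for m in lengths) else 0
-- ===== Notes on version B (the rewrite author's own statement) =====
-- stated objective: alternative
-- what changed: Replaces the recursion on successive string halves by a staged pass: first compute the halving level lengths with a counting loop, then test every such prefix for being a palindrome with all(); Pre_ excludes only the empty string, on which A recurses forever (RecursionError).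
-- intended difference: On palindromes of length >= 2 whose halving chain fails at a deeper level (e.g. 'abba'), A falls off the end and returns None while B returns 0, the intended negative answer. — e.g. on aka("abba"): A returns none, B returns some 0
import Mathlib
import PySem

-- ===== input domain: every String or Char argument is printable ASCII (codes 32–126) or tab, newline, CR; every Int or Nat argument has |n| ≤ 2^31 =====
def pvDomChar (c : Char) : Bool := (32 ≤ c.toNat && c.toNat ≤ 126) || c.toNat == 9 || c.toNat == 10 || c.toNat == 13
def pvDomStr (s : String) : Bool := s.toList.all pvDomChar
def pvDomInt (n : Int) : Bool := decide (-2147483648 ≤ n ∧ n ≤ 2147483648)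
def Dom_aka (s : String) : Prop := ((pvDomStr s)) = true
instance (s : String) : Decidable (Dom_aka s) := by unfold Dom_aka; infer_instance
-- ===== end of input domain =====

-- B precomputes the halving level lengths and checks every such prefix for being a palindrome
-- with all() (objective: alternative decomposition, no recursion on the string).

-- ===== PORT A =====
-- A's recursion on code points; s[::-1] is reverse, s[:len(s)//2] is take (length/2).
-- The fuel argument (initially the string length) only makes the recursion total; it is never
-- exhausted on nonempty input.  On the empty string Python A recurses forever (RecursionError),
-- excluded by Pre_aka.
def akaCharsFuel : Nat → List Char → Option Int
  | 0, _ => none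
  | f + 1, s =>
    let re_s := s.reverse
    if s.length = 1 then some 1
    else
      if re_s = s then
        (if akaCharsFuel f (s.take (s.length / 2)) = some 1 then some 1 else none)
      else some 0

def aka (s : String) : Option Int := akaCharsFuel s.toList.length s.toList

-- ===== PORT B =====
-- the 'while n > 1: lengths.append(n); n //= 2' loop of Source B (fuel = n is a totality guard only)
def lengthsOfAux : Nat → Nat → List Nat
  | 0, _ => []
  | f + 1, n => if 1 < n then n :: lengthsOfAux f (n / 2) else []

def lengthsOf (n : Nat) : List Nat := lengthsOfAux n n

-- '1 if all(s[:m] == s[:m][::-1] for m in lengths) else 0'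
def aka_alt (s : String) : Option Int :=
  if (lengthsOf s.toList.length).all (fun m => s.toList.take m == (s.toList.take m).reverse)
  then some 1 else some 0

-- ===== PRECONDITION & SPEC =====
-- Pre_ excludes only the empty string: there Python A recurses on "" forever (RecursionError).
def Pre_aka (s : String) : Prop := s.toList ≠ []
instance (s : String) : Decidable (Pre_aka s) := by unfold Pre_aka; infer_instance
def pvWitness_aka : String := "ab"

-- all-levels-palindrome predicate used only to state D_ (inspects the input, computes no output;
-- fuel = length is a totality guard only)
def halvesPalAux : Nat → List Char → Bool
  | 0, _ => true
  | f + 1, l =>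
    if l.length ≤ 1 then true
    else (l.reverse == l) && halvesPalAux f (l.take (l.length / 2))

def halvesPal (l : List Char) : Bool := halvesPalAux l.length l

-- On palindromes of length ≥ 2 whose halving chain fails deeper down, A falls off the end and
-- returns None while B returns 0, the intended negative answer.
def D_aka (s : String) : Prop :=
  2 ≤ s.toList.length ∧ (s.toList.reverse == s.toList) = true ∧
    halvesPal (s.toList.take (s.toList.length / 2)) = false
instance (s : String) : Decidable (D_aka s) := by unfold D_aka; infer_instance

def Spec_aka (s : String) (out : Option Int) : Prop := ¬ D_aka s → out = aka_alt s
instance (s : String) (out : Option Int) : Decidable (Spec_aka s out) := by unfold Spec_aka; infer_instance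

def pvDiffWitness_aka : String := "abba"
def pvDiffWitnessOut_aka : (Option Int) × (Option Int) := (none, some 0)

-- ===== CLAIM (what is proved, stated in full; the proofs are below) =====
def Claim_unchanged_aka : Prop := ∀ (s : String), Dom_aka s → Pre_aka s → Spec_aka s (aka s)
def Claim_changed_aka : Prop := Dom_aka (pvDiffWitness_aka) ∧ Pre_aka (pvDiffWitness_aka) ∧ D_aka (pvDiffWitness_aka) ∧ aka (pvDiffWitness_aka) = pvDiffWitnessOut_aka.1 ∧ aka_alt (pvDiffWitness_aka) = pvDiffWitnessOut_aka.2 ∧ pvDiffWitnessOut_aka.1 ≠ pvDiffWitnessOut_aka.2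
def Claim_exact_aka : Prop := ∀ (s : String), Dom_aka s → Pre_aka s → D_aka s → aka s ≠ aka_alt s

-- ===== LEMMAS AND PROOFS =====

theorem lengthsOfAux_nil (f n : Nat) (h : ¬ 1 < n) : lengthsOfAux f n = [] := by
  cases f <;> simp [lengthsOfAux, h]

theorem halvesPalAux_small (f : Nat) (l : List Char) (h : l.length ≤ 1) :
    halvesPalAux f l = true := by
  cases f <;> simp [halvesPalAux, h]

theorem lengthsOfAux_mono (n : Nat) : ∀ (f g : Nat), n ≤ f → n ≤ g →
    lengthsOfAux f n = lengthsOfAux g n := by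
  induction n using Nat.strong_induction_on with
  | _ n ih =>
    intro f g hf hg
    by_cases h1 : 1 < n
    · obtain ⟨f', rfl⟩ : ∃ f', f = f' + 1 := ⟨f - 1, by omega⟩
      obtain ⟨g', rfl⟩ : ∃ g', g = g' + 1 := ⟨g - 1, by omega⟩
      simp only [lengthsOfAux, if_pos h1]
      rw [ih (n / 2) (by omega) f' g' (by omega) (by omega)]
    · rw [lengthsOfAux_nil f n h1, lengthsOfAux_nil g n h1]

theorem lengthsOf_unfold (n : Nat) :
    lengthsOf n = if 1 < n then n :: lengthsOf (n / 2) else [] := by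
  by_cases h1 : 1 < n
  · rw [if_pos h1]
    obtain ⟨n', rfl⟩ : ∃ n', n = n' + 1 := ⟨n - 1, by omega⟩
    unfold lengthsOf
    simp only [lengthsOfAux, if_pos h1]
    rw [lengthsOfAux_mono ((n' + 1) / 2) n' ((n' + 1) / 2) (by omega) (le_refl _)]
  · rw [if_neg h1]
    exact lengthsOfAux_nil n n h1

theorem mem_lengthsOfAux_le {m : Nat} : ∀ (f n : Nat), m ∈ lengthsOfAux f n → m ≤ n := by
  intro f
  induction f with
  | zero => intro n h; simp [lengthsOfAux] at h
  | succ f ih =>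
    intro n h
    simp only [lengthsOfAux] at h
    split at h
    · rcases List.mem_cons.mp h with h | h
      · omega
      · have := ih (n / 2) h; omega
    · simp at h

theorem mem_lengthsOf_le {m n : Nat} (h : m ∈ lengthsOf n) : m ≤ n :=
  mem_lengthsOfAux_le n n h

theorem take_half_length (l : List Char) (h : ¬ l.length ≤ 1) :
    (l.take (l.length / 2)).length = l.length / 2 := by
  rw [List.length_take]; omega

theorem take_half_ne_nil (l : List Char) (h : ¬ l.length ≤ 1) :
    l.take (l.length / 2) ≠ [] := by
  intro he
  have := congrArg List.length he
  rw [take_half_length l h] at this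
  simp at this; omega

theorem halvesPalAux_mono (n : Nat) : ∀ (l : List Char), l.length = n → ∀ (f g : Nat),
    n ≤ f → n ≤ g → halvesPalAux f l = halvesPalAux g l := by
  induction n using Nat.strong_induction_on with
  | _ n ih =>
    intro l hn f g hf hg
    by_cases h1 : l.length ≤ 1
    · rw [halvesPalAux_small f l h1, halvesPalAux_small g l h1]
    · obtain ⟨f', rfl⟩ : ∃ f', f = f' + 1 := ⟨f - 1, by omega⟩
      obtain ⟨g', rfl⟩ : ∃ g', g = g' + 1 := ⟨g - 1, by omega⟩
      simp only [halvesPalAux, if_neg h1]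
      rw [ih (l.length / 2) (by omega) _ (take_half_length l h1) f' g' (by omega) (by omega)]

theorem halvesPalAux_succ_of (f : Nat) (l : List Char) (hf : l.length ≤ f + 1)
    (h1 : ¬ l.length ≤ 1) :
    halvesPalAux (f + 1) l = ((l.reverse == l) && halvesPal (l.take (l.length / 2))) := by
  simp only [halvesPalAux, if_neg h1]
  unfold halvesPal
  rw [halvesPalAux_mono (l.length / 2) _ (take_half_length l h1) f
    ((l.take (l.length / 2)).length) (by omega) (by rw [take_half_length l h1])]

theorem halvesPal_unfold (l : List Char) :
    halvesPal l = if l.length ≤ 1 then true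
      else ((l.reverse == l) && halvesPal (l.take (l.length / 2))) := by
  by_cases h1 : l.length ≤ 1
  · rw [if_pos h1]; exact halvesPalAux_small _ _ h1
  · rw [if_neg h1]
    obtain ⟨n, hn⟩ : ∃ n, l.length = n + 1 := ⟨l.length - 1, by omega⟩
    unfold halvesPal
    conv_lhs => rw [hn]
    exact halvesPalAux_succ_of n l (by omega) h1

theorem akaCharsFuel_mono (n : Nat) : ∀ (l : List Char), l.length = n → 1 ≤ n → ∀ (f g : Nat),
    n ≤ f → n ≤ g → akaCharsFuel f l = akaCharsFuel g l := by
  induction n using Nat.strong_induction_on with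
  | _ n ih =>
    intro l hn hpos f g hf hg
    obtain ⟨f', rfl⟩ : ∃ f', f = f' + 1 := ⟨f - 1, by omega⟩
    obtain ⟨g', rfl⟩ : ∃ g', g = g' + 1 := ⟨g - 1, by omega⟩
    by_cases h1 : l.length = 1
    · simp [akaCharsFuel, h1]
    · have h1' : ¬ l.length ≤ 1 := by omega
      by_cases hp : l.reverse = l
      · simp only [akaCharsFuel, if_neg h1, if_pos hp]
        rw [ih (l.length / 2) (by omega) _ (take_half_length l h1') (by omega) f' g'
          (by omega) (by omega)]
      · simp [akaCharsFuel, h1, hp]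

theorem akaCharsFuel_succ_of (f : Nat) (l : List Char) (hf : l.length ≤ f + 1)
    (hpos : 1 ≤ l.length) :
    akaCharsFuel (f + 1) l = if l.length = 1 then some 1
      else if l.reverse = l then
        (if akaCharsFuel (l.length / 2) (l.take (l.length / 2)) = some 1
         then some 1 else none)
      else some 0 := by
  by_cases h1 : l.length = 1
  · simp [akaCharsFuel, h1]
  · have h1' : ¬ l.length ≤ 1 := by omega
    by_cases hp : l.reverse = l
    · simp only [akaCharsFuel, if_neg h1, if_pos hp]
      rw [akaCharsFuel_mono (l.length / 2) _ (take_half_length l h1') (by omega) f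
        (l.length / 2) (by omega) (le_refl _)]
    · simp [akaCharsFuel, h1, hp]

theorem aka_unfold (l : List Char) (hne : l ≠ []) :
    akaCharsFuel l.length l = if l.length = 1 then some 1
      else if l.reverse = l then
        (if akaCharsFuel (l.length / 2) (l.take (l.length / 2)) = some 1
         then some 1 else none)
      else some 0 := by
  have hpos : 1 ≤ l.length := by
    have : l.length ≠ 0 := fun h => hne (List.length_eq_zero_iff.mp h)
    omega
  obtain ⟨n, hn⟩ : ∃ n, l.length = n + 1 := ⟨l.length - 1, by omega⟩
  conv_lhs => rw [hn]
  exact akaCharsFuel_succ_of n l (by omega) hpos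

theorem rev_beq_false {l : List Char} (hp : ¬ l.reverse = l) : (l.reverse == l) = false := by
  simp [hp]

theorem all_congr_mem {p q : Nat → Bool} : ∀ (L : List Nat), (∀ m ∈ L, p m = q m) →
    L.all p = L.all q := by
  intro L h
  induction L with
  | nil => rfl
  | cons a t ih =>
    simp only [List.all_cons]
    rw [h a (by simp), ih (fun m hm => h m (by simp [hm]))]

-- B's staged check equals the recursive all-levels predicate
theorem all_lengths_eq_halvesPal (n : Nat) : ∀ (l : List Char), l.length = n →
    (lengthsOf l.length).all (fun m => l.take m == (l.take m).reverse) = halvesPal l := by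
  induction n using Nat.strong_induction_on with
  | _ n ih =>
    intro l hn
    by_cases h1 : l.length ≤ 1
    · rw [lengthsOf_unfold, halvesPal_unfold]
      simp [h1]
    · have h2 : 1 < l.length := by omega
      have hhl := take_half_length l h1
      rw [lengthsOf_unfold, halvesPal_unfold]
      simp only [if_pos h2, if_neg h1, List.all_cons]
      have htail : (lengthsOf (l.length / 2)).all (fun m => l.take m == (l.take m).reverse) =
          (lengthsOf (l.take (l.length / 2)).length).all
            (fun m => (l.take (l.length / 2)).take m ==
              ((l.take (l.length / 2)).take m).reverse) := by
        rw [hhl]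
        refine all_congr_mem _ (fun m hm => ?_)
        rw [List.take_take, Nat.min_eq_left (mem_lengthsOf_le hm)]
      rw [htail, ih (l.length / 2) (by omega) _ hhl, List.take_of_length_le (le_refl _)]
      by_cases hp : l.reverse = l
      · simp [hp]
      · have hrl : (l == l.reverse) = false := by
          simp; exact fun h => hp h.symm
        simp [hrl, rev_beq_false hp]

-- A returns 1 exactly on the all-levels palindromes (for nonempty input)
theorem akaChars_eq_one_iff (n : Nat) : ∀ (l : List Char), l.length = n → l ≠ [] →
    (akaCharsFuel l.length l = some 1 ↔ halvesPal l = true) := by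
  induction n using Nat.strong_induction_on with
  | _ n ih =>
    intro l hn hne
    by_cases h1 : l.length = 1
    · rw [aka_unfold l hne, halvesPal_unfold]; simp [h1]
    · have h2 : 2 ≤ l.length := by
        have : l.length ≠ 0 := fun h => hne (List.length_eq_zero_iff.mp h)
        omega
      have h1' : ¬ l.length ≤ 1 := by omega
      have hhl := take_half_length l h1'
      have hhne := take_half_ne_nil l h1'
      have hrec := ih (l.length / 2) (by omega) _ hhl hhne
      rw [hhl] at hrec
      rw [aka_unfold l hne, halvesPal_unfold]
      by_cases hp : l.reverse = l
      · simp only [if_neg h1, if_neg h1', hp, beq_self_eq_true, Bool.true_and]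
        by_cases hh : akaCharsFuel (l.length / 2) (l.take (l.length / 2)) = some 1
        · simp [hh, hrec.mp hh]
        · simp only [if_neg hh]
          constructor
          · intro hc; exact absurd hc (by simp)
          · intro hc; exact absurd (hrec.mpr hc) hh
      · simp [h1, hp, h1', rev_beq_false hp]

theorem aka_alt_cases (s : String) :
    aka_alt s = if halvesPal s.toList then some 1 else some 0 := by
  unfold aka_alt
  rw [all_lengths_eq_halvesPal s.toList.length s.toList rfl]

theorem aka_spec : Claim_unchanged_aka := by
  intro s _ hpre hnd
  rw [aka_alt_cases]
  unfold aka
  set l := s.toList with hl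
  by_cases h1 : l.length = 1
  · have hpal : halvesPal l = true := by rw [halvesPal_unfold]; simp [h1]
    rw [aka_unfold l hpre]; simp [h1, hpal]
  · have h2 : 2 ≤ l.length := by
      have : l.length ≠ 0 := fun h => hpre (List.length_eq_zero_iff.mp h)
      omega
    have h1' : ¬ l.length ≤ 1 := by omega
    by_cases hp : l.reverse = l
    · -- palindrome at top; D_ excluded means the deeper levels are palindromic too
      have hh : halvesPal (l.take (l.length / 2)) = true := by
        by_contra hc
        exact hnd ⟨h2, by rw [beq_iff_eq]; exact hp, by simpa using Bool.eq_false_iff.mpr hc⟩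
      have hone : akaCharsFuel (l.length / 2) (l.take (l.length / 2)) = some 1 := by
        have := (akaChars_eq_one_iff (l.length / 2) _ (take_half_length l h1')
          (take_half_ne_nil l h1')).mpr hh
        rwa [take_half_length l h1'] at this
      have hpal : halvesPal l = true := by
        rw [halvesPal_unfold, if_neg h1', hp]; simp [hh]
      rw [aka_unfold l hpre]; simp [h1, hp, hone, hpal]
    · have hpal : halvesPal l = false := by
        rw [halvesPal_unfold, if_neg h1', rev_beq_false hp]; simp
      rw [aka_unfold l hpre]; simp [h1, hp, hpal]

theorem aka_changed : Claim_changed_aka := by unfold Claim_changed_aka; decide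

theorem aka_tight : Claim_exact_aka := by
  intro s _ hpre hd
  obtain ⟨h2, hpb, hh⟩ := hd
  set l := s.toList with hl
  have hp : l.reverse = l := by simpa using hpb
  have h1' : ¬ l.length ≤ 1 := by omega
  have hnot : akaCharsFuel (l.length / 2) (l.take (l.length / 2)) ≠ some 1 := by
    intro hc
    have hiff := akaChars_eq_one_iff (l.length / 2) _ (take_half_length l h1')
      (take_half_ne_nil l h1')
    rw [take_half_length l h1'] at hiff
    rw [hiff.mp hc] at hh
    cases hh
  have h1 : ¬ l.length = 1 := by omega
  have hA : aka s = none := by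
    unfold aka; rw [← hl, aka_unfold l hpre]
    simp [h1, hp, hnot]
  have hB : aka_alt s = some 0 := by
    rw [aka_alt_cases, ← hl]
    have hpal : halvesPal l = false := by
      rw [halvesPal_unfold, if_neg h1', hp]; simp [hh]
    simp [hpal]
  rw [hA, hB]; simp
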